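-- pv_equiv track=rewrite | github.com/JoaoLMPereira/acx-acronym-expander | acrodisam/out_expanders/impl/maddog.py | deep_strip
-- ===== SOURCE A (Python) =====
-- def deep_strip(text):
--     new_text = ""
--     for c in text:
--         if len(c.strip()) > 0:
--             new_text += c
--         else:
--             new_text += " "
--     new_text = new_text.replace('"', "'")
--     return new_text
-- ===== SOURCE B (Python) =====
-- def deep_strip(text):
--     table = {ord(c): ord(" ") for c in set(text) if c.isspace()}
--     table[ord('"')] = ord("'")
--     return text.translate(table)
-- ===== Notes on version B (the rewrite author's own statement) =====
-- stated objective: idiomatic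
-- what changed: Replaces the per-character branch-and-concatenate loop plus a trailing str.replace with building an ord->ord translation table from the set of whitespace characters (plus quote->apostrophe) and a single str.translate call.
import Mathlib
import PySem

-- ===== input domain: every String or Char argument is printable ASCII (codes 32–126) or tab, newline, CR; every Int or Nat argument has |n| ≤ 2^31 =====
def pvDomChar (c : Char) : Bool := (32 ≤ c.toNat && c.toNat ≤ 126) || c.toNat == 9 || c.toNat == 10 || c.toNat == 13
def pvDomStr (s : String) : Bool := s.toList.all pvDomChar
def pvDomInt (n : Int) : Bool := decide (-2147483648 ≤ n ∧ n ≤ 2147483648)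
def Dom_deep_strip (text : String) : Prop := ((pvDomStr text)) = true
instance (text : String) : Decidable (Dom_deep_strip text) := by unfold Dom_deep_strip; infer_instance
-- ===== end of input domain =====

-- B replaces A's per-character branch-and-concatenate loop plus trailing replace with a
-- whitespace translation table built once and a single translate pass (idiomatic rewrite, same cost).

-- ===== PORT A =====
-- the loop: new_text += c / new_text += " " depending on len(c.strip()) > 0
def deep_strip (text : String) : String :=
  let new_text : List Char :=
    text.toList.foldl
      (fun acc c =>
        if (PySem.Chars.strip [c]).length > 0 then acc ++ [c] else acc ++ [' '])
      []
  String.mk (PySem.Chars.replace new_text ['"'] ['\''])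

-- ===== PORT B =====
-- str.translate with an int->int table has no PySem primitive; ported by hand: each character's
-- code point is looked up in the table, a hit maps to the table's code point, a miss keeps the
-- character — exact for a dict of ord->ord mappings as Source B builds.
def deep_strip_alt (text : String) : String :=
  let table0 : PySem.Dict Nat Nat :=
    (PySem.Set.ofList text.toList).foldl
      (fun d c => if PySem.Chars.isspace c then d.insert c.toNat 32 else d)
      PySem.Dict.empty
  let table := table0.insert 34 39
  String.mk (text.toList.map (fun c =>
    match table.get? c.toNat with
    | some n => Char.ofNat n
    | none => c))

-- ===== PRECONDITION & SPEC =====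
def Spec_deep_strip (text : String) (out : String) : Prop := out = deep_strip_alt text
instance (text : String) (out : String) : Decidable (Spec_deep_strip text out) := by unfold Spec_deep_strip; infer_instance

-- ===== CLAIM (what is proved, stated in full; the proofs are below) =====
def Claim_equal_deep_strip : Prop := ∀ (text : String), Dom_deep_strip text → Spec_deep_strip text (deep_strip text)

-- ===== LEMMAS AND PROOFS =====

theorem char_toNat_inj {a b : Char} (h : a.toNat = b.toNat) : a = b := by
  apply Char.ext
  exact UInt32.toNat_inj.mp h

-- A's per-character branch keeps c exactly when it is not whitespace
theorem strip_single (c : Char) :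
    ((PySem.Chars.strip [c]).length > 0) ↔ PySem.Chars.isspace c = false := by
  by_cases h : PySem.Chars.isspace c = true <;>
    simp [PySem.Chars.strip, PySem.Chars.lstrip, PySem.Chars.rstrip, h,
      List.dropWhile]

-- A's foldl builds a map
theorem foldA (l : List Char) (acc : List Char) :
    l.foldl
      (fun acc c =>
        if (PySem.Chars.strip [c]).length > 0 then acc ++ [c] else acc ++ [' '])
      acc
    = acc ++ l.map (fun c => if PySem.Chars.isspace c then ' ' else c) := by
  induction l generalizing acc with
  | nil => simp
  | cons c t ih =>
      by_cases h : PySem.Chars.isspace c = true <;>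
        simp [List.foldl, ih, (strip_single c), h]

-- replacing the single character '"' is a map
theorem replace_go_quote (l : List Char) (fuel : Nat) (acc : List Char)
    (h : l.length ≤ fuel) :
    PySem.Chars.replace.go ['"'] ['\''] fuel l acc
      = acc.reverse ++ l.map (fun c => if c = '"' then '\'' else c) := by
  induction l generalizing fuel acc with
  | nil => cases fuel <;> simp [PySem.Chars.replace.go]
  | cons c t ih =>
      cases fuel with
      | zero => simp at h
      | succ f =>
          by_cases hc : c = '"'
          · subst hc
            have hpre : List.isPrefixOf ['"'] ('"' :: t) = true := by
              simp [List.isPrefixOf]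
            simp only [PySem.Chars.replace.go, hpre, if_true]
            simp [ih f ('\'' :: acc) (by simpa using h)]
          · have hpre : List.isPrefixOf ['"'] (c :: t) = false := by
              simp [List.isPrefixOf]
              exact fun hb => hc (by simpa using hb.symm)
            simp only [PySem.Chars.replace.go, hpre]
            simp [ih f (c :: acc) (by simpa using h), hc]

theorem replace_quote (l : List Char) :
    PySem.Chars.replace l ['"'] ['\'']
      = l.map (fun c => if c = '"' then '\'' else c) := by
  simp [PySem.Chars.replace]
  simpa using replace_go_quote l l.length [] le_rfl

-- lookup in the whitespace table built by B's fold
theorem table0_get? (l : List Char) (d : PySem.Dict Nat Nat) (n : Nat) :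
    (l.foldl (fun d c => if PySem.Chars.isspace c then d.insert c.toNat 32 else d) d).get? n
      = if l.any (fun c => PySem.Chars.isspace c && c.toNat == n) then some 32
        else d.get? n := by
  induction l generalizing d with
  | nil => simp
  | cons c t ih =>
      simp only [List.foldl, List.any_cons]
      by_cases hs : PySem.Chars.isspace c = true
      · rw [ih]
        by_cases ht : t.any (fun c => PySem.Chars.isspace c && c.toNat == n) = true
        · simp [ht, hs]
        · by_cases hn : c.toNat = n
          · subst hn
            simp [ht, hs, PySem.Dict.get?_insert_self]
          · simp only [hs, if_true]
            rw [PySem.Dict.get?_insert_of_ne _ _ (Ne.symm hn)]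
            simp [ht, hn]
      · simp only [Bool.not_eq_true] at hs
        simp [ih, hs]

theorem deep_strip_eq_alt (text : String) : deep_strip text = deep_strip_alt text := by
  unfold deep_strip deep_strip_alt
  simp only [foldA, List.nil_append, replace_quote, List.map_map]
  congr 1
  apply List.map_congr_left
  intro c hc
  by_cases hq : c = '"'
  · subst hq
    have h34 : '"'.toNat = 34 := rfl
    rw [h34, PySem.Dict.get?_insert_self]
    simp [PySem.Chars.isspace]
  · have hn : c.toNat ≠ 34 := by
      intro h; exact hq (char_toNat_inj (h.trans rfl))
    rw [PySem.Dict.get?_insert_of_ne _ _ hn, table0_get?]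
    by_cases hs : PySem.Chars.isspace c = true
    · have hmem : c ∈ PySem.Set.ofList text.toList :=
        (PySem.Set.mem_ofList _ _).mpr hc
      have hany : (PySem.Set.ofList text.toList).any
          (fun d => PySem.Chars.isspace d && d.toNat == c.toNat) = true :=
        List.any_eq_true.mpr ⟨c, hmem, by simp [hs]⟩
      have hq' : (' ' : Char) ≠ '"' := by decide
      simp [hany, hs, hq']
    · simp only [Bool.not_eq_true] at hs
      have hany : (PySem.Set.ofList text.toList).any
          (fun d => PySem.Chars.isspace d && d.toNat == c.toNat) = false := by
        rw [List.any_eq_false]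
        intro d _
        simp only [Bool.and_eq_true, beq_iff_eq, not_and]
        intro hd hdn
        have : d = c := char_toNat_inj hdn
        subst this
        simp [hs] at hd
      simp [hany, hs, hq, PySem.Dict.get?_empty]

-- ===== VERDICT (by name: the statement is the Claim_ definition above) =====
theorem deep_strip_spec : Claim_equal_deep_strip := by
  intro text _
  unfold Spec_deep_strip
  exact deep_strip_eq_alt text
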